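-- pv_equiv track=rewrite | github.com/alxp1104/proyecto-de-calculo | proyecto calculo derivadas tkinter as tk.py | identify_derivative_rule
-- ===== SOURCE A (Python) =====
-- def identify_derivative_rule(expr_str):
--     if "+" in expr_str or "-" in expr_str:
--         return "usando la regla de la suma/resta"
--     elif "*" in expr_str:
--         return "usando la regla del producto"
--     elif "/" in expr_str:
--         return "usando la regla del cociente"
--     elif "^" in expr_str or "**" in expr_str:
--         return "usando la regla de la potencia"
--     elif any(trig in expr_str for trig in ["sin", "cos", "tan"]):
--         return "usando las fórmulas de derivación trigonométrica"
--     elif any(inv_trig in expr_str for inv_trig in ["asin", "acos", "atan", "acot", "asec", "acsc"]):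
--         return "usando las fórmulas de derivación de funciones trigonométricas inversas"
--     elif "exp" in expr_str:
--         return "usando que la derivada de e^x es e^x"
--     elif "ln" in expr_str or "log" in expr_str:
--         return "usando la regla de derivación logarítmica"
--     elif "sqrt" in expr_str:
--         return "usando la regla de la cadena para la raíz cuadrada"
--     else:
--         return ""
-- ===== SOURCE B (Python) =====
-- def identify_derivative_rule(expr_str):
--     # Single left-to-right scan: collect feature flags in one pass over the
--     # characters (instead of repeated substring searches), then decide by priority.
--     f_sum = f_prod = f_quot = f_pow = False
--     f_trig = f_inv = f_exp = f_log = f_sqrt = False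
--     for i in range(len(expr_str)):
--         c = expr_str[i]
--         if c == '+' or c == '-':
--             f_sum = True
--         if c == '*':
--             f_prod = True
--         if c == '/':
--             f_quot = True
--         if c == '^':
--             f_pow = True
--         w2 = expr_str[i:i+2]
--         w3 = expr_str[i:i+3]
--         w4 = expr_str[i:i+4]
--         if w3 == 'sin' or w3 == 'cos' or w3 == 'tan':
--             f_trig = True
--         if w4 in ('asin', 'acos', 'atan', 'acot', 'asec', 'acsc'):
--             f_inv = True
--         if w3 == 'exp':
--             f_exp = True
--         if w2 == 'ln' or w3 == 'log':
--             f_log = True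
--         if w4 == 'sqrt':
--             f_sqrt = True
--     if f_sum:
--         return "usando la regla de la suma/resta"
--     if f_prod:
--         return "usando la regla del producto"
--     if f_quot:
--         return "usando la regla del cociente"
--     if f_pow:
--         # A also tests '**' here, but any string containing '**' contains '*'
--         # and was already classified as a product above, so '^' alone suffices.
--         return "usando la regla de la potencia"
--     if f_trig:
--         return "usando las fórmulas de derivación trigonométrica"
--     if f_inv:
--         return "usando las fórmulas de derivación de funciones trigonométricas inversas"
--     if f_exp:
--         return "usando que la derivada de e^x es e^x"
--     if f_log:
--         return "usando la regla de derivación logarítmica"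
--     if f_sqrt:
--         return "usando la regla de la cadena para la raíz cuadrada"
--     return ""
-- ===== Notes on version B (the rewrite author's own statement) =====
-- stated objective: alternative
-- what changed: Replaces A's up-to-twenty independent substring searches ('tok' in expr_str) by a single left-to-right scan that accumulates nine boolean feature flags from the character and the 2/3/4-char window at each position, followed by a flag-only priority decision ('^' alone suffices for the power flag since any '**' string is already classified as a product).
import Mathlib
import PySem

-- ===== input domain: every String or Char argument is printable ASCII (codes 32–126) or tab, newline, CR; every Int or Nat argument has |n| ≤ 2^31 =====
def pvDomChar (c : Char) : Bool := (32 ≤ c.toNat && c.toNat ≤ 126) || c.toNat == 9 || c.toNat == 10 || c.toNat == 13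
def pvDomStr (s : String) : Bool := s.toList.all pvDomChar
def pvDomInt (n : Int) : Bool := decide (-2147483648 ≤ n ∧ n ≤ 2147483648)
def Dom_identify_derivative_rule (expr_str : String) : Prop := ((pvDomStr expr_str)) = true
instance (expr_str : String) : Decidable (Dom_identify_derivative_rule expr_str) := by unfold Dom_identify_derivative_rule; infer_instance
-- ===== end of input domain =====

-- ===== PORT A =====
-- B replaces A's twenty substring searches by ONE left-to-right scan that collects
-- feature flags, then a flag-only decision (alternative decomposition, same cost class).
def identify_derivative_rule (expr_str : String) : String :=
  if PySem.Str.isIn "+" expr_str || PySem.Str.isIn "-" expr_str then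
    "usando la regla de la suma/resta"
  else if PySem.Str.isIn "*" expr_str then
    "usando la regla del producto"
  else if PySem.Str.isIn "/" expr_str then
    "usando la regla del cociente"
  else if PySem.Str.isIn "^" expr_str || PySem.Str.isIn "**" expr_str then
    "usando la regla de la potencia"
  else if (["sin", "cos", "tan"] : List String).any (fun trig => PySem.Str.isIn trig expr_str) then
    "usando las fórmulas de derivación trigonométrica"
  else if (["asin", "acos", "atan", "acot", "asec", "acsc"] : List String).any (fun t => PySem.Str.isIn t expr_str) then
    "usando las fórmulas de derivación de funciones trigonométricas inversas"
  else if PySem.Str.isIn "exp" expr_str then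
    "usando que la derivada de e^x es e^x"
  else if PySem.Str.isIn "ln" expr_str || PySem.Str.isIn "log" expr_str then
    "usando la regla de derivación logarítmica"
  else if PySem.Str.isIn "sqrt" expr_str then
    "usando la regla de la cadena para la raíz cuadrada"
  else ""

-- ===== PORT B =====
-- The nine feature flags Source B accumulates during its single pass.
structure PvFlags where
  fSum : Bool
  fProd : Bool
  fQuot : Bool
  fPow : Bool
  fTrig : Bool
  fInv : Bool
  fExp : Bool
  fLog : Bool
  fSqrt : Bool
deriving Repr, DecidableEq

-- One iteration of Source B's loop body at index i.  expr_str[i] with 0 ≤ i < len is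
-- exactly getD; the slices expr_str[i:i+k] (0 ≤ i, clamped at the end) are exactly
-- take k (drop i).
def pvStep (cs : List Char) (f : PvFlags) (i : Nat) : PvFlags :=
  let c := cs.getD i ' '
  let w2 := (cs.drop i).take 2
  let w3 := (cs.drop i).take 3
  let w4 := (cs.drop i).take 4
  { fSum := f.fSum || (c == '+' || c == '-')
    fProd := f.fProd || c == '*'
    fQuot := f.fQuot || c == '/'
    fPow := f.fPow || c == '^'
    fTrig := f.fTrig || (w3 == "sin".toList || w3 == "cos".toList || w3 == "tan".toList)
    fInv := f.fInv || (w4 == "asin".toList || w4 == "acos".toList || w4 == "atan".toList ||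
                       w4 == "acot".toList || w4 == "asec".toList || w4 == "acsc".toList)
    fExp := f.fExp || w3 == "exp".toList
    fLog := f.fLog || (w2 == "ln".toList || w3 == "log".toList)
    fSqrt := f.fSqrt || w4 == "sqrt".toList }

def identify_derivative_rule_alt (expr_str : String) : String :=
  let cs := expr_str.toList
  -- for i in range(len(expr_str)): one fold over the index range
  let f := (List.range cs.length).foldl (pvStep cs)
    ⟨false, false, false, false, false, false, false, false, false⟩
  if f.fSum then "usando la regla de la suma/resta"
  else if f.fProd then "usando la regla del producto"
  else if f.fQuot then "usando la regla del cociente"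
  else if f.fPow then "usando la regla de la potencia"
  else if f.fTrig then "usando las fórmulas de derivación trigonométrica"
  else if f.fInv then "usando las fórmulas de derivación de funciones trigonométricas inversas"
  else if f.fExp then "usando que la derivada de e^x es e^x"
  else if f.fLog then "usando la regla de derivación logarítmica"
  else if f.fSqrt then "usando la regla de la cadena para la raíz cuadrada"
  else ""

-- ===== PRECONDITION & SPEC =====
def Spec_identify_derivative_rule (expr_str : String) (out : String) : Prop := out = identify_derivative_rule_alt expr_str
instance (expr_str : String) (out : String) : Decidable (Spec_identify_derivative_rule expr_str out) := by unfold Spec_identify_derivative_rule; infer_instance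

-- ===== CLAIM (what is proved, stated in full; the proofs are below) =====
def Claim_equal_identify_derivative_rule : Prop := ∀ (expr_str : String), Dom_identify_derivative_rule expr_str → Spec_identify_derivative_rule expr_str (identify_derivative_rule expr_str)

-- ===== LEMMAS AND PROOFS =====

-- The fold of Source B's loop computes each flag as an 'any' over the index range.
lemma pv_foldl_flags (cs : List Char) (l : List Nat) (f : PvFlags) :
    l.foldl (pvStep cs) f =
      ⟨f.fSum || l.any (fun i => cs.getD i ' ' == '+' || cs.getD i ' ' == '-'),
       f.fProd || l.any (fun i => cs.getD i ' ' == '*'),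
       f.fQuot || l.any (fun i => cs.getD i ' ' == '/'),
       f.fPow || l.any (fun i => cs.getD i ' ' == '^'),
       f.fTrig || l.any (fun i => (cs.drop i).take 3 == "sin".toList || ((cs.drop i).take 3 == "cos".toList || (cs.drop i).take 3 == "tan".toList)),
       f.fInv || l.any (fun i => (cs.drop i).take 4 == "asin".toList || ((cs.drop i).take 4 == "acos".toList || ((cs.drop i).take 4 == "atan".toList ||
                                 ((cs.drop i).take 4 == "acot".toList || ((cs.drop i).take 4 == "asec".toList || (cs.drop i).take 4 == "acsc".toList))))),
       f.fExp || l.any (fun i => (cs.drop i).take 3 == "exp".toList),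
       f.fLog || l.any (fun i => (cs.drop i).take 2 == "ln".toList || (cs.drop i).take 3 == "log".toList),
       f.fSqrt || l.any (fun i => (cs.drop i).take 4 == "sqrt".toList)⟩ := by
  induction l generalizing f with
  | nil => simp
  | cons i t ih =>
    simp only [List.foldl_cons, ih, pvStep, List.any_cons, Bool.or_assoc]

-- distribute 'any' over a disjunction (no library lemma matched)
lemma pv_any_or {a : Type} (l : List a) (p q : a → Bool) :
    (l.any fun x => p x || q x) = (l.any p || l.any q) := by
  rw [Bool.eq_iff_iff]
  simp only [List.any_eq_true, Bool.or_eq_true]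
  aesop

-- an 'any' of a window comparison over the index range IS the substring test
lemma pv_any_slice (cs tok : List Char) (k : Nat) (hk : tok.length = k) (hne : tok ≠ []) :
    (List.range cs.length).any (fun i => (cs.drop i).take k == tok) = PySem.Chars.isIn tok cs := by
  rcases h : PySem.Chars.isIn tok cs with _ | _
  · rw [PySem.Chars.isIn_eq_false_iff] at h
    simp only [List.any_eq_false, List.mem_range, beq_iff_eq]
    intro i _ heq
    exact h ((List.IsPrefix.isInfix (List.prefix_iff_eq_take.mpr (by rw [hk, heq]))).trans
      (List.drop_suffix i cs).isInfix)
  · obtain ⟨j, hj⟩ := (PySem.Chars.exists_prefix_drop_iff_isIn (sub := tok) (s := cs)).mpr h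
    simp only [List.any_eq_true, List.mem_range, beq_iff_eq]
    refine ⟨j, ?_, ?_⟩
    · by_contra hlt
      rw [List.drop_eq_nil_of_le (by omega)] at hj
      exact hne (List.prefix_nil.mp hj)
    · rw [List.prefix_iff_eq_take] at hj
      rw [← hk]; exact hj.symm
-- an 'any' of a character comparison over the index range IS membership
lemma pv_any_getD (cs : List Char) (a d : Char) :
    (List.range cs.length).any (fun i => cs.getD i d == a) = cs.contains a := by
  rcases h : cs.contains a with _ | _
  · simp only [List.any_eq_false, List.mem_range, beq_iff_eq]
    intro i hi heq
    simp only [List.contains_eq_mem, decide_eq_false_iff_not] at h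
    exact h (heq ▸ (List.getD_eq_getElem cs d hi ▸ List.getElem_mem hi))
  · simp only [List.contains_eq_mem, decide_eq_true_eq] at h
    obtain ⟨i, hi, heq⟩ := List.mem_iff_getElem.mp h
    simp only [List.any_eq_true, List.mem_range, beq_iff_eq]
    exact ⟨i, hi, by rw [List.getD_eq_getElem cs d hi, heq]⟩

-- 'c in s' for a one-character token is membership
lemma pv_isIn_one (a : Char) (cs : List Char) : PySem.Chars.isIn [a] cs = cs.contains a := by
  rw [Bool.eq_iff_iff]
  simp [PySem.Chars.isIn_iff_infix, List.singleton_infix_iff, List.contains_eq_mem]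

-- no '*' in the string → no '**' either (why A's extra '**' test is redundant)
lemma pv_no_star_no_dstar (cs : List Char) (h : ¬ '*' ∈ cs) :
    PySem.Chars.isIn ['*', '*'] cs = false := by
  rw [PySem.Chars.isIn_eq_false_iff]
  intro hinf
  exact h (hinf.subset (by simp))

-- ===== VERDICT (by name: the statement is the Claim_ definition above) =====
theorem identify_derivative_rule_spec : Claim_equal_identify_derivative_rule := by
  intro s _
  unfold Spec_identify_derivative_rule identify_derivative_rule identify_derivative_rule_alt
  dsimp only
  rw [pv_foldl_flags]
  simp only [pv_any_or]
  rw [pv_any_getD, pv_any_getD, pv_any_getD, pv_any_getD, pv_any_getD]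
  rw [pv_any_slice s.toList "sin".toList 3 rfl (by simp),
      pv_any_slice s.toList "cos".toList 3 rfl (by simp),
      pv_any_slice s.toList "tan".toList 3 rfl (by simp),
      pv_any_slice s.toList "asin".toList 4 rfl (by simp),
      pv_any_slice s.toList "acos".toList 4 rfl (by simp),
      pv_any_slice s.toList "atan".toList 4 rfl (by simp),
      pv_any_slice s.toList "acot".toList 4 rfl (by simp),
      pv_any_slice s.toList "asec".toList 4 rfl (by simp),
      pv_any_slice s.toList "acsc".toList 4 rfl (by simp),
      pv_any_slice s.toList "exp".toList 3 rfl (by simp),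
      pv_any_slice s.toList "ln".toList 2 rfl (by simp),
      pv_any_slice s.toList "log".toList 3 rfl (by simp),
      pv_any_slice s.toList "sqrt".toList 4 rfl (by simp)]
  simp only [PySem.Str.isIn, List.any_cons, List.any_nil, Bool.or_false, Bool.false_or,
    show "+".toList = ['+'] from rfl, show "-".toList = ['-'] from rfl,
    show "*".toList = ['*'] from rfl, show "/".toList = ['/'] from rfl,
    show "^".toList = ['^'] from rfl, show "**".toList = ['*', '*'] from rfl, pv_isIn_one]
  by_cases hsum : '+' ∈ s.toList ∨ '-' ∈ s.toList
  · simp [hsum]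
  · by_cases hprod : '*' ∈ s.toList
    · simp [hsum, hprod]
    · rw [pv_no_star_no_dstar s.toList hprod]
      simp [hsum, hprod]
      -- identical chains up to the Decidable instances the rewrites left behind
      refine if_congr Iff.rfl rfl ?_
      refine if_congr Iff.rfl rfl ?_
      refine if_congr Iff.rfl rfl ?_
      refine if_congr Iff.rfl rfl ?_
      refine if_congr Iff.rfl rfl ?_
      refine if_congr Iff.rfl rfl ?_
      exact if_congr Iff.rfl rfl rfl
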